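-- pv_equiv track=rewrite | github.com/yan293/UncaliPose | src/.ipynb_checkpoints/plot_functions-checkpoint.py | absSecondDerivative
-- ===== SOURCE A (Python) =====
-- def absSecondDerivative(X):
--     '''
--     Comput numerical 2nd-order derivative, pad 0s to the beginning and end.
--     '''
--     res = [0]
--     for i in range(1, len(X) - 1):
--         left_derivative = X[i] - X[i - 1]
--         right_derivative = X[i + 1] - X[i]
--         res.append(abs(right_derivative - left_derivative))
--     res.append(0)
--     return res
-- ===== SOURCE B (Python) =====
-- def absSecondDerivative(X):
--     # Two-pass decomposition: first build the first-difference table, then take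
--     # absolute differences of consecutive first differences, padding 0s at both ends.
--     diffs = [X[k + 1] - X[k] for k in range(len(X) - 1)]
--     res = [0]
--     for j in range(1, len(diffs)):
--         res.append(abs(diffs[j] - diffs[j - 1]))
--     res.append(0)
--     return res
-- ===== Notes on version B (the rewrite author's own statement) =====
-- stated objective: alternative
-- what changed: B replaces A's fused loop over second differences with a two-pass decomposition: it first materialises the first-difference table (np.diff-style), then takes absolute differences of consecutive entries of that table.
import Mathlib
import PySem

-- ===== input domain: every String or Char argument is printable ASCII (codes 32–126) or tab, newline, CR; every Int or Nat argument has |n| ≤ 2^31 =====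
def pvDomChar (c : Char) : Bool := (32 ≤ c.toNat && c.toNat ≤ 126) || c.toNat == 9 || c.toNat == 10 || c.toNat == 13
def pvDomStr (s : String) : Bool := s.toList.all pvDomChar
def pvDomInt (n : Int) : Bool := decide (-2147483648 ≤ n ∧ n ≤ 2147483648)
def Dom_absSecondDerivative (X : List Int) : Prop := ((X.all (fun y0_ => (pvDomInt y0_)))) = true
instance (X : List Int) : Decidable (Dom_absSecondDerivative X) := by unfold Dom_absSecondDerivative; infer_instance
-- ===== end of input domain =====

-- B recomputes the same absolute second derivative via a two-pass decomposition
-- (first-difference table, then consecutive absolute differences) instead of A's fused loop.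


-- ===== PORT A =====
-- literal port of A: res = [0]; for i in range(1, len(X)-1): append |(X[i+1]-X[i]) - (X[i]-X[i-1])|; append 0
def absSecondDerivative (X : List Int) : List Int :=
  let res : List Int :=
    (PySem.List.pyRange 1 ((X.length : Int) - 1) 1).foldl
      (fun res i =>
        let left_derivative := PySem.List.pyGetD X i 0 - PySem.List.pyGetD X (i - 1) 0
        let right_derivative := PySem.List.pyGetD X (i + 1) 0 - PySem.List.pyGetD X i 0
        res ++ [|right_derivative - left_derivative|]) [0]
  res ++ [0]

-- ===== PORT B =====
-- literal port of B: diffs table first, then loop over consecutive entries of diffs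
def absSecondDerivative_alt (X : List Int) : List Int :=
  let diffs : List Int :=
    (PySem.List.pyRange 0 ((X.length : Int) - 1) 1).map
      (fun k => PySem.List.pyGetD X (k + 1) 0 - PySem.List.pyGetD X k 0)
  let res : List Int :=
    (PySem.List.pyRange 1 (diffs.length : Int) 1).foldl
      (fun res j =>
        res ++ [|PySem.List.pyGetD diffs j 0 - PySem.List.pyGetD diffs (j - 1) 0|]) [0]
  res ++ [0]

-- ===== PRECONDITION & SPEC =====
def Spec_absSecondDerivative (X : List Int) (out : List Int) : Prop := out = absSecondDerivative_alt X
instance (X : List Int) (out : List Int) : Decidable (Spec_absSecondDerivative X out) := by unfold Spec_absSecondDerivative; infer_instance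

-- ===== CLAIM (what is proved, stated in full; the proofs are below) =====
def Claim_equal_absSecondDerivative : Prop := ∀ (X : List Int), Dom_absSecondDerivative X → Spec_absSecondDerivative X (absSecondDerivative X)

-- ===== LEMMAS AND PROOFS =====

theorem absSecondDerivative_eq_alt (X : List Int) :
    absSecondDerivative X = absSecondDerivative_alt X := by
  unfold absSecondDerivative absSecondDerivative_alt
  simp only [PySem.List.foldl_append_singleton_eq_map, List.length_map,
    PySem.List.length_pyRange_one, Int.sub_zero]
  congr 1
  congr 1
  -- both maps over pyRange 1 m 1 with m = (X.length:Int)-1 vs its toNat cast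
  have hlen : (((((X.length : Int) - 1).toNat : Int)) : Int) = max ((X.length : Int) - 1) 0 := by
    omega
  rw [hlen]
  rcases Nat.eq_zero_or_pos X.length with h0 | hpos
  · simp [h0, PySem.List.pyRange_one_eq_nil]
  · have hmax : max ((X.length : Int) - 1) 0 = (X.length : Int) - 1 := by omega
    rw [hmax]
    apply List.map_congr_left
    intro j hj
    rw [PySem.List.mem_pyRange_one] at hj
    have h1 : PySem.List.pyGetD
        ((PySem.List.pyRange 0 ((X.length : Int) - 1) 1).map
          (fun k => PySem.List.pyGetD X (k + 1) 0 - PySem.List.pyGetD X k 0)) j 0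
        = PySem.List.pyGetD X (j + 1) 0 - PySem.List.pyGetD X j 0 :=
      PySem.List.pyGetD_map_pyRange_of_nonneg _ _ _ _ (by omega) (by omega)
    have h2 : PySem.List.pyGetD
        ((PySem.List.pyRange 0 ((X.length : Int) - 1) 1).map
          (fun k => PySem.List.pyGetD X (k + 1) 0 - PySem.List.pyGetD X k 0)) (j - 1) 0
        = PySem.List.pyGetD X (j - 1 + 1) 0 - PySem.List.pyGetD X (j - 1) 0 :=
      PySem.List.pyGetD_map_pyRange_of_nonneg _ _ _ _ (by omega) (by omega)
    rw [h1, h2]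
    ring_nf

-- ===== VERDICT (by name: the statement is the Claim_ definition above) =====
theorem absSecondDerivative_spec : Claim_equal_absSecondDerivative := by
  intro X _
  unfold Spec_absSecondDerivative
  exact absSecondDerivative_eq_alt X
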